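-- pv_equiv track=rewrite | github.com/Heliooz/CEA-Test | Exercice4.py | solution
-- ===== SOURCE A (Python) =====
-- import math
--
-- def partition(array, low, high):
--
--     # choose the rightmost element as pivot
--     pivot = array[high]
--
--     # pointer for greater element
--     i = low - 1
--
--     # traverse through all elements
--     # compare each element with pivot
--     for j in range(low, high):
--         if array[j] <= pivot:
--
--             # If element smaller than pivot is found
--             # swap it with the greater element pointed by i
--             i = i + 1
--
--             # Swapping element at i with element at j
--             (array[i], array[j]) = (array[j], array[i])
--
--     # Swap the pivot element with the greater element specified by i
--     (array[i + 1], array[high]) = (array[high], array[i + 1])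
--
--     # Return the position from where partition is done
--     return i + 1
--
-- def quickSort(array, low, high):
--     if low < high:
--
--         # Find pivot element such that
--         # element smaller than pivot are on the left
--         # element greater than pivot are on the right
--         pi = partition(array, low, high)
--
--         # Recursive call on the left of pivot
--         quickSort(array, low, pi - 1)
--
--         # Recursive call on the right of pivot
--         quickSort(array, pi + 1, high)
--
-- def solution(A):
--     length = len(A)
--     # Tri le tableau en ordre croissant
--     quickSort(A, 0, length-1)
--     # definir les indexs
--     left_index = 0
--     right_index = length - 1
--     # definir la meilleure valeur
--     best_value = math.inf
--     # Vu que l'on tri notre liste on peut être sur que la solution sera un nombre négatif + un nombre positif ou 2 x le plus petit nombre (en valeur absolue)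
--     # On peut donc partir de l'exterieur vers l'interieur afin que nos 2 index se retrouvent sur la valeur absolue la plus faible
--     # Tant que nos index ne se croisent pas
--     while(left_index <= right_index):
--         # On calcule la valeur de la somme à nos index
--         current_value = abs(A[left_index] + A[right_index])
--         # On remplace si elle est meilleure que notre valeur actuelle
--         if(best_value > current_value): best_value = current_value
--         # Si la valeur est 0, on peut directement retourner
--         if(best_value == 0): return best_value
--         # On deplace l'index de la valeur absolue la plus elevé vers le centre
--         if(abs(A[left_index]) > abs(A[right_index])): left_index += 1
--         else: right_index -= 1
--     return best_value
-- ===== SOURCE B (Python) =====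
-- def solution(A):
--     # Sort by absolute value (instead of sorting by value + two-pointer scan):
--     # the minimum |x + y| over pairs is min(2*|s[0]|, min over adjacent |s[k] + s[k+1]|)
--     # in abs-sorted order (a same-sign pair costs at least 2*|s[0]|; an opposite-sign
--     # pair is bounded below by some adjacent sign-flip pair). One linear pass, no two pointers.
--     # Note: unlike A, B does not mutate A in place.
--     s = sorted(A, key=abs)
--     best = 2 * abs(s[0])
--     for x, y in zip(s, s[1:]):
--         cur = abs(x + y)
--         if cur < best:
--             best = cur
--     return best
-- ===== Notes on version B (the rewrite author's own statement) =====
-- stated objective: faster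
-- what changed: Replaces A's hand-written in-place quicksort followed by an outside-in two-pointer scan with a sort by absolute value and one adjacent-pairs pass (min of 2*|s[0]| and |s[k]+s[k+1]|), which computes the same minimum |pair sum|.
-- outside the precondition, e.g. on solution([]): A returns inf, B raises IndexError
import Mathlib
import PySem

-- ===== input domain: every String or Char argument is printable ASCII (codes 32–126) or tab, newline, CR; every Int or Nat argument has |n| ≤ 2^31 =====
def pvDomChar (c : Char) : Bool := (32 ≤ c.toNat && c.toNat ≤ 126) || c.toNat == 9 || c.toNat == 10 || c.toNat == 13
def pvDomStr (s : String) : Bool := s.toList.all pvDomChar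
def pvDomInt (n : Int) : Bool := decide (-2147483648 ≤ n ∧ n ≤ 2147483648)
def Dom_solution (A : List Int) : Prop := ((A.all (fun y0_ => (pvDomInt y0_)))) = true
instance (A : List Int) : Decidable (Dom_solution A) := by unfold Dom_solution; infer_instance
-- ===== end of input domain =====

-- B replaces A's hand-written in-place quicksort + outside-in two-pointer scan by a sort by
-- ABSOLUTE value followed by one adjacent-pairs pass (min of 2*|s[0]| and the |s[k]+s[k+1]|),
-- which computes the same minimum |pair sum|. A sorts its argument in place, B does not:
-- the equivalence proved here is about the return value.

-- ===== PORT A =====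
-- Python list indexing `a[k]` / assignment `a[k] = v`: in this program every index that is
-- ever used is in [0, len(a)), so `a.getD k.toNat 0` / `a.set k.toNat v` are exact here
-- (Python would wrap negatives / raise out of range, which never occurs in these call sites).
def pvGet (a : List Int) (k : Int) : Int := a.getD k.toNat 0
def pvSet (a : List Int) (k : Int) (v : Int) : List Int := a.set k.toNat v

-- body of `for j in range(low, high): ...` in `partition`
def pvPartStep (pivot : Int) (s : List Int × Int) (j : Int) : List Int × Int :=
  if pvGet s.1 j ≤ pivot then
    let i1 := s.2 + 1
    -- (array[i], array[j]) = (array[j], array[i])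
    (pvSet (pvSet s.1 i1 (pvGet s.1 j)) j (pvGet s.1 i1), i1)
  else s

def partitionPy (a : List Int) (low high : Int) : List Int × Int :=
  let pivot := pvGet a high
  let s := (PySem.List.pyRange low high).foldl (pvPartStep pivot) (a, low - 1)
  -- (array[i+1], array[high]) = (array[high], array[i+1])
  (pvSet (pvSet s.1 (s.2 + 1) (pvGet s.1 high)) high (pvGet s.1 (s.2 + 1)), s.2 + 1)

-- the partition loop adds at most one to `i` per range element (used for termination only)
theorem pvPartStep_fold_snd (pivot : Int) (js : List Int) (s : List Int × Int) :
    s.2 ≤ (js.foldl (pvPartStep pivot) s).2 ∧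
      (js.foldl (pvPartStep pivot) s).2 ≤ s.2 + js.length := by
  induction js generalizing s with
  | nil => simp
  | cons j js ih =>
    have h := ih (pvPartStep pivot s j)
    have hstep : s.2 ≤ (pvPartStep pivot s j).2 ∧ (pvPartStep pivot s j).2 ≤ s.2 + 1 := by
      unfold pvPartStep; split <;> simp
    simp only [List.foldl_cons, List.length_cons] at *
    omega

theorem partitionPy_snd_bounds (a : List Int) (low high : Int) (h : low < high) :
    low ≤ (partitionPy a low high).2 ∧ (partitionPy a low high).2 ≤ high := by
  have hb := pvPartStep_fold_snd (pvGet a high) (PySem.List.pyRange low high) (a, low - 1)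
  have hl : (PySem.List.pyRange low high).length = (high - low).toNat :=
    PySem.List.length_pyRange_one low high
  unfold partitionPy
  simp only []
  omega

def quickSortPy (a : List Int) (low high : Int) : List Int :=
  if _h : low < high then
    let p := partitionPy a low high
    let a1 := quickSortPy p.1 low (p.2 - 1)
    quickSortPy a1 (p.2 + 1) high
  else a
termination_by (high - low + 1).toNat
decreasing_by
  · have := partitionPy_snd_bounds a low high _h; omega
  · have := partitionPy_snd_bounds a low high _h; omega

-- `if(best_value > current_value): best_value = current_value`; `none` is the initial math.inf
-- (`inf > cur` is always true and `inf == 0` is false, which is exactly the `none` branch;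
-- the final `best.getD 0` is reached with `none` only for A = [], which Pre_solution excludes,
-- where Python A returns the float math.inf).
def pvBestA (best : Option Int) (cur : Int) : Int :=
  match best with | none => cur | some b => if b > cur then cur else b

-- the `while(left_index <= right_index)` loop of A
def scanA (a : List Int) (left right : Int) (best : Option Int) : Int :=
  if left ≤ right then
    let cur := |pvGet a left + pvGet a right|
    let b1 := pvBestA best cur
    if b1 = 0 then b1
    else if |pvGet a left| > |pvGet a right| then scanA a (left + 1) right (some b1)
    else scanA a left (right - 1) (some b1)
  else best.getD 0
termination_by (right - left + 1).toNat
decreasing_by all_goals omega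

def solution (A : List Int) : Int :=
  let length : Int := A.length
  let A1 := quickSortPy A 0 (length - 1)
  scanA A1 0 (length - 1) none

-- ===== PORT B =====
-- body of `for x, y in zip(s, s[1:]): cur = abs(x + y); if cur < best: best = cur`
def pvAdjStep (b : Int) (p : Int × Int) : Int :=
  let cur := |p.1 + p.2|
  if cur < b then cur else b

def solution_alt (A : List Int) : Int :=
  let s := PySem.List.sorted A (fun x => |x|)
  -- `best = 2 * abs(s[0])`: s is nonempty under Pre_solution, so `s.getD 0 0` is exact
  -- (for the excluded A = [] Python raises IndexError here)
  let best := 2 * |s.getD 0 0|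
  (s.zip s.tail).foldl pvAdjStep best

-- ===== PRECONDITION & SPEC =====
-- Pre_ excludes only the empty list, on which A returns math.inf (a float, not an int) and B raises IndexError.
def Pre_solution (A : List Int) : Prop := A ≠ []
instance (A : List Int) : Decidable (Pre_solution A) := by unfold Pre_solution; infer_instance
def pvWitness_solution : List Int := ([1, -3] : List Int)

def Spec_solution (A : List Int) (out : Int) : Prop := out = solution_alt A
instance (A : List Int) (out : Int) : Decidable (Spec_solution A out) := by unfold Spec_solution; infer_instance

-- ===== CLAIM (what is proved, stated in full; the proofs are below) =====
def Claim_equal_solution : Prop := ∀ (A : List Int), Dom_solution A → Pre_solution A → Spec_solution A (solution A)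

-- ===== LEMMAS AND PROOFS =====

theorem pvSet_length (a : List Int) (k v : Int) : (pvSet a k v).length = a.length := by
  simp [pvSet]

theorem pvGet_eq_getElem (a : List Int) (k : Int) (h0 : 0 ≤ k) (h1 : k < (a.length : Int)) :
    pvGet a k = a[k.toNat]'(by omega) := by
  simp [pvGet, List.getD]
  rw [List.getElem?_eq_getElem (by omega)]
  rfl

theorem pvGet_pvSet_self (a : List Int) (k v : Int) (h0 : 0 ≤ k) (h1 : k < (a.length : Int)) :
    pvGet (pvSet a k v) k = v := by
  rw [pvGet_eq_getElem _ _ h0 (by simp [pvSet_length]; omega)]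
  simp [pvSet]

theorem pvGet_pvSet_ne (a : List Int) (k m v : Int) (h0 : 0 ≤ k) (hm : 0 ≤ m) (hne : k ≠ m) :
    pvGet (pvSet a m v) k = pvGet a k := by
  simp only [pvGet, pvSet, List.getD]
  rw [List.getElem?_set_ne (by omega)]

theorem pvSwap_perm (b : List Int) (i j : Int) (h0 : 0 ≤ i) (h1 : i < (b.length : Int))
    (h2 : 0 ≤ j) (h3 : j < (b.length : Int)) :
    (pvSet (pvSet b i (pvGet b j)) j (pvGet b i)).Perm b := by
  rw [pvGet_eq_getElem b j h2 h3, pvGet_eq_getElem b i h0 h1]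
  exact List.set_set_perm (by omega) (by omega)

-- the partition loop invariant, after the elements of range(low, j) have been processed
def PInv (a b : List Int) (pivot low j i : Int) : Prop :=
  b.length = a.length ∧ b.Perm a ∧
  low - 1 ≤ i ∧ i < j ∧
  (∀ k : Int, 0 ≤ k → k < (a.length : Int) → (k < low ∨ j ≤ k) → pvGet b k = pvGet a k) ∧
  (∀ k : Int, low ≤ k → k < j → ∃ k', low ≤ k' ∧ k' < j ∧ pvGet b k = pvGet a k') ∧
  (∀ k : Int, low ≤ k → k ≤ i → pvGet b k ≤ pivot) ∧
  (∀ k : Int, i < k → k < j → pivot < pvGet b k)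

theorem pvPartStep_inv (a b : List Int) (pivot low j i : Int)
    (h0 : 0 ≤ low) (hlj : low ≤ j) (hjh : j < (a.length : Int))
    (hinv : PInv a b pivot low j i) :
    PInv a (pvPartStep pivot (b, i) j).1 pivot low (j + 1) (pvPartStep pivot (b, i) j).2 := by
  obtain ⟨hlen, hperm, hil, hij, hunt, hsrc, hle, hgt⟩ := hinv
  have hbl : (b.length : Int) = (a.length : Int) := by exact_mod_cast hlen
  unfold pvPartStep
  simp only []
  split
  case isFalse h =>
    refine ⟨hlen, hperm, by omega, by omega, ?_, ?_, hle, ?_⟩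
    · intro k hk0 hkl hk
      rcases hk with hk | hk
      · exact hunt k hk0 hkl (Or.inl hk)
      · exact hunt k hk0 hkl (Or.inr (by omega))
    · intro k hk1 hk2
      by_cases hkj : k < j
      · obtain ⟨k', h1, h2, h3⟩ := hsrc k hk1 hkj
        exact ⟨k', h1, by omega, h3⟩
      · have hkj' : k = j := by omega
        subst hkj'
        exact ⟨k, hk1, by omega, hunt k (by omega) (by omega) (Or.inr le_rfl)⟩
    · intro k hik hkj
      by_cases hkj' : k < j
      · exact hgt k hik hkj'
      · have : k = j := by omega
        subst this
        exact not_le.mp h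
  case isTrue h =>
    set i1 : Int := i + 1 with hi1
    set b' : List Int := pvSet (pvSet b i1 (pvGet b j)) j (pvGet b i1) with hb'
    have hi10 : 0 ≤ i1 := by omega
    have hi1j : i1 ≤ j := by omega
    have hlen' : b'.length = a.length := by rw [hb', pvSet_length, pvSet_length, hlen]
    have g1 : pvGet b' j = pvGet b i1 := by
      rw [hb']
      exact pvGet_pvSet_self _ j _ (by omega) (by rw [pvSet_length]; omega)
    have g2 : i1 ≠ j → pvGet b' i1 = pvGet b j := by
      intro hne
      rw [hb', pvGet_pvSet_ne _ _ _ _ hi10 (by omega) hne]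
      exact pvGet_pvSet_self _ i1 _ hi10 (by omega)
    have g3 : ∀ k : Int, 0 ≤ k → k ≠ i1 → k ≠ j → pvGet b' k = pvGet b k := by
      intro k hk0 hki hkj
      rw [hb', pvGet_pvSet_ne _ _ _ _ hk0 (by omega) hkj,
          pvGet_pvSet_ne _ _ _ _ hk0 hi10 hki]
    have gsrcj : ∃ k', low ≤ k' ∧ k' < j + 1 ∧ pvGet b' j = pvGet a k' := by
      by_cases hej : i1 = j
      · refine ⟨j, hlj, by omega, ?_⟩
        rw [g1, hej]
        exact hunt j (by omega) (by omega) (Or.inr le_rfl)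
      · obtain ⟨k', h1, h2, h3⟩ := hsrc i1 (by omega) (by omega)
        exact ⟨k', h1, by omega, by rw [g1, h3]⟩
    refine ⟨hlen', (pvSwap_perm b i1 j hi10 (by omega) (by omega) (by omega)).trans hperm,
      by omega, by omega, ?_, ?_, ?_, ?_⟩
    · intro k hk0 hkl hk
      have hkj : k ≠ j := by omega
      have hki : k ≠ i1 := by omega
      rw [g3 k hk0 hki hkj]
      rcases hk with hk | hk
      · exact hunt k hk0 hkl (Or.inl hk)
      · exact hunt k hk0 hkl (Or.inr (by omega))
    · intro k hk1 hk2
      by_cases hkj : k = j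
      · subst hkj; exact gsrcj
      · by_cases hki : k = i1
        · subst hki
          have hne : i1 ≠ j := fun he => hkj he
          refine ⟨j, hlj, by omega, ?_⟩
          rw [g2 hne]
          exact hunt j (by omega) (by omega) (Or.inr le_rfl)
        · rw [g3 k (by omega) hki hkj]
          obtain ⟨k', h1, h2, h3⟩ := hsrc k hk1 (by omega)
          exact ⟨k', h1, by omega, h3⟩
    · intro k hk1 hk2
      by_cases hki : k = i1
      · subst hki
        by_cases hej : i1 = j
        · rw [hej, g1, hej]; exact h
        · rw [g2 hej]; exact h
      · have hkj : k ≠ j := by omega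
        rw [g3 k (by omega) hki hkj]
        exact hle k hk1 (by omega)
    · intro k hik hkj1
      by_cases hkj : k = j
      · subst hkj
        rw [g1]
        exact hgt i1 (by omega) (by omega)
      · rw [g3 k (by omega) (by omega) hkj]
        exact hgt k (by omega) (by omega)

theorem partition_loop_inv : ∀ (n : Nat) (a b : List Int) (pivot low j high i : Int),
    (high - j).toNat ≤ n → 0 ≤ low → low ≤ j → j ≤ high → high < (a.length : Int) →
    PInv a b pivot low j i →
    PInv a ((PySem.List.pyRange j high).foldl (pvPartStep pivot) (b, i)).1 pivot low high
      ((PySem.List.pyRange j high).foldl (pvPartStep pivot) (b, i)).2 := by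
  intro n
  induction n with
  | zero =>
    intro a b pivot low j high i hn h0 hlj hjh hh hinv
    have hje : j = high := by omega
    subst hje
    have hnil : PySem.List.pyRange j j = [] := by
      rw [PySem.List.pyRange_one]
      simp
    rw [hnil]
    exact hinv
  | succ n ih =>
    intro a b pivot low j high i hn h0 hlj hjh hh hinv
    by_cases hjlt : j < high
    · rw [PySem.List.pyRange_one_cons hjlt, List.foldl_cons]
      have hstep := pvPartStep_inv a b pivot low j i h0 hlj (by omega) hinv
      have hrec := ih a (pvPartStep pivot (b, i) j).1 pivot low (j + 1) high
        (pvPartStep pivot (b, i) j).2 (by omega) h0 (by omega) (by omega) hh hstep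
      rwa [Prod.mk.eta] at hrec
    · have hje : j = high := by omega
      subst hje
      have hnil : PySem.List.pyRange j j = [] := by
        rw [PySem.List.pyRange_one]
        simp
      rw [hnil]
      exact hinv

theorem partition_main (a : List Int) (low high : Int)
    (h : low < high) (h0 : 0 ≤ low) (hh : high < (a.length : Int)) :
    (partitionPy a low high).1.length = a.length ∧
    (partitionPy a low high).1.Perm a ∧
    low ≤ (partitionPy a low high).2 ∧ (partitionPy a low high).2 ≤ high ∧
    (∀ k : Int, 0 ≤ k → k < (a.length : Int) → (k < low ∨ high < k) →
      pvGet (partitionPy a low high).1 k = pvGet a k) ∧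
    (∀ k : Int, low ≤ k → k ≤ high → ∃ k', low ≤ k' ∧ k' ≤ high ∧
      pvGet (partitionPy a low high).1 k = pvGet a k') ∧
    (∀ k : Int, low ≤ k → k < (partitionPy a low high).2 →
      pvGet (partitionPy a low high).1 k ≤ pvGet a high) ∧
    pvGet (partitionPy a low high).1 (partitionPy a low high).2 = pvGet a high ∧
    (∀ k : Int, (partitionPy a low high).2 < k → k ≤ high →
      pvGet a high ≤ pvGet (partitionPy a low high).1 k) := by
  have hinv0 : PInv a a (pvGet a high) low low (low - 1) :=
    ⟨rfl, List.Perm.refl a, le_refl _, by omega, fun k _ _ _ => rfl,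
     fun k h1 h2 => absurd h1 (by omega),
     fun k h1 h2 => absurd h1 (by omega),
     fun k h1 h2 => absurd h1 (by omega)⟩
  have hloop := partition_loop_inv (high - low).toNat a a (pvGet a high) low low high (low - 1)
    (le_refl _) h0 (le_refl _) (by omega) hh hinv0
  obtain ⟨hlen, hperm, hil, hih, hunt, hsrc, hle, hgt⟩ := hloop
  set s := (PySem.List.pyRange low high).foldl (pvPartStep (pvGet a high)) (a, low - 1) with hs
  have hpeq : partitionPy a low high =
      (pvSet (pvSet s.1 (s.2 + 1) (pvGet s.1 high)) high (pvGet s.1 (s.2 + 1)), s.2 + 1) := rfl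
  set b := s.1
  set i := s.2
  set pi : Int := i + 1 with hpi
  have hbl : (b.length : Int) = (a.length : Int) := by exact_mod_cast hlen
  have hpi0 : 0 ≤ pi := by omega
  have hpih : pi ≤ high := by omega
  have hpiv : pvGet b high = pvGet a high := hunt high (by omega) hh (Or.inr le_rfl)
  set b2 : List Int := pvSet (pvSet b pi (pvGet b high)) high (pvGet b pi) with hb2
  have f1 : pvGet b2 high = pvGet b pi := by
    rw [hb2]
    exact pvGet_pvSet_self _ high _ (by omega) (by rw [pvSet_length]; omega)
  have f2 : pi ≠ high → pvGet b2 pi = pvGet b high := by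
    intro hne
    rw [hb2, pvGet_pvSet_ne _ _ _ _ hpi0 (by omega) hne]
    exact pvGet_pvSet_self _ pi _ hpi0 (by omega)
  have f3 : ∀ k : Int, 0 ≤ k → k ≠ pi → k ≠ high → pvGet b2 k = pvGet b k := by
    intro k hk0 hkp hkh
    rw [hb2, pvGet_pvSet_ne _ _ _ _ hk0 (by omega) hkh,
        pvGet_pvSet_ne _ _ _ _ hk0 hpi0 hkp]
  rw [hpeq]
  simp only []
  refine ⟨by rw [hb2, pvSet_length, pvSet_length, hlen],
    ((by rw [hb2]; exact pvSwap_perm b pi high hpi0 (by omega) (by omega) (by omega)) :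
      b2.Perm b).trans hperm,
    by omega, by omega, ?_, ?_, ?_, ?_, ?_⟩
  · intro k hk0 hkl hk
    rw [f3 k hk0 (by omega) (by omega)]
    rcases hk with hk | hk
    · exact hunt k hk0 hkl (Or.inl hk)
    · exact hunt k hk0 hkl (Or.inr (by omega))
  · intro k hk1 hk2
    by_cases hkh : k = high
    · rw [hkh, f1]
      by_cases hpe : pi = high
      · rw [hpe, hpiv]
        exact ⟨high, by omega, le_rfl, rfl⟩
      · obtain ⟨k', h1, h2, h3⟩ := hsrc pi (by omega) (by omega)
        exact ⟨k', h1, by omega, h3⟩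
    · by_cases hkp : k = pi
      · have hne : pi ≠ high := by omega
        rw [hkp, f2 hne, hpiv]
        exact ⟨high, by omega, le_rfl, rfl⟩
      · rw [f3 k (by omega) hkp hkh]
        obtain ⟨k', h1, h2, h3⟩ := hsrc k hk1 (by omega)
        exact ⟨k', h1, by omega, h3⟩
  · intro k hk1 hk2
    rw [f3 k (by omega) (by omega) (by omega)]
    exact hle k hk1 (by omega)
  · by_cases hpe : pi = high
    · rw [hpe, f1, hpe, hpiv]
    · rw [f2 hpe, hpiv]
  · intro k hk1 hk2
    by_cases hkh : k = high
    · rw [hkh, f1]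
      exact le_of_lt (hgt pi (by omega) (by omega))
    · rw [f3 k (by omega) (by omega) hkh]
      exact le_of_lt (hgt k (by omega) (by omega))

theorem quickSort_main : ∀ (m : Nat) (a : List Int) (low high : Int),
    (high - low).toNat ≤ m → 0 ≤ low → high < (a.length : Int) →
    (quickSortPy a low high).length = a.length ∧
    (quickSortPy a low high).Perm a ∧
    (∀ k : Int, 0 ≤ k → k < (a.length : Int) → (k < low ∨ high < k) →
      pvGet (quickSortPy a low high) k = pvGet a k) ∧
    (∀ k : Int, low ≤ k → k ≤ high → ∃ k', low ≤ k' ∧ k' ≤ high ∧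
      pvGet (quickSortPy a low high) k = pvGet a k') ∧
    (∀ k1 k2 : Int, low ≤ k1 → k1 ≤ k2 → k2 ≤ high →
      pvGet (quickSortPy a low high) k1 ≤ pvGet (quickSortPy a low high) k2) := by
  intro m
  induction m with
  | zero =>
    intro a low high hn h0 hh
    have hlh : ¬ low < high := by omega
    rw [quickSortPy, dif_neg hlh]
    exact ⟨rfl, List.Perm.refl a, fun k _ _ _ => rfl, fun k h1 h2 => ⟨k, h1, h2, rfl⟩,
      fun k1 k2 h1 h2 h3 => le_of_eq (congrArg (pvGet a) (by omega : k1 = k2))⟩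
  | succ n ih =>
    intro a low high hn h0 hh
    by_cases hlh : low < high
    · obtain ⟨hplen, hpperm, hpil, hpih, hpunt, hpsrc, hpleft, hppiv, hpright⟩ :=
        partition_main a low high hlh h0 hh
      set p := partitionPy a low high with hp
      have hL1 : ((p.1).length : Int) = (a.length : Int) := by exact_mod_cast hplen
      obtain ⟨h1len, h1perm, h1unt, h1src, h1sort⟩ :=
        ih p.1 low (p.2 - 1) (by omega) h0 (by omega)
      set a2 := quickSortPy p.1 low (p.2 - 1) with ha2
      have hL2 : ((a2.length) : Int) = (a.length : Int) := by
        rw [show a2.length = (p.1).length from h1len]; exact hL1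
      obtain ⟨h2len, h2perm, h2unt, h2src, h2sort⟩ :=
        ih a2 (p.2 + 1) high (by omega) (by omega) (by omega)
      set a3 := quickSortPy a2 (p.2 + 1) high with ha3
      have hqeq : quickSortPy a low high = a3 := by
        rw [quickSortPy, dif_pos hlh]
      rw [hqeq]
      -- value of the pivot cell survives both recursive calls
      have hpivA3 : pvGet a3 p.2 = pvGet a high := by
        rw [h2unt p.2 (by omega) (by omega) (Or.inl (by omega)),
            h1unt p.2 (by omega) (by omega) (Or.inr (by omega)), hppiv]
      have hleftA3 : ∀ k : Int, low ≤ k → k < p.2 → pvGet a3 k ≤ pvGet a high := by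
        intro k hk1 hk2
        rw [h2unt k (by omega) (by omega) (Or.inl (by omega))]
        obtain ⟨k', h1, h2, h3⟩ := h1src k hk1 (by omega)
        rw [h3]
        exact hpleft k' h1 (by omega)
      have hrightA3 : ∀ k : Int, p.2 < k → k ≤ high → pvGet a high ≤ pvGet a3 k := by
        intro k hk1 hk2
        obtain ⟨k', h1, h2, h3⟩ := h2src k (by omega) hk2
        rw [h3, h1unt k' (by omega) (by omega) (Or.inr (by omega))]
        exact hpright k' (by omega) h2
      refine ⟨by rw [h2len, h1len, hplen], h2perm.trans (h1perm.trans hpperm), ?_, ?_, ?_⟩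
      · intro k hk0 hkl hk
        rw [h2unt k hk0 (by omega) (by rcases hk with hk | hk; exact Or.inl (by omega); exact Or.inr hk),
            h1unt k hk0 (by omega) (by rcases hk with hk | hk; exact Or.inl hk; exact Or.inr (by omega))]
        exact hpunt k hk0 hkl hk
      · intro k hk1 hk2
        -- a3 → a2
        obtain ⟨k1, hk11, hk12, hk13⟩ : ∃ k1, low ≤ k1 ∧ k1 ≤ high ∧ pvGet a3 k = pvGet a2 k1 := by
          by_cases hc : p.2 + 1 ≤ k
          · obtain ⟨k', h1, h2, h3⟩ := h2src k hc hk2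
            exact ⟨k', by omega, h2, h3⟩
          · exact ⟨k, hk1, hk2, h2unt k (by omega) (by omega) (Or.inl (by omega))⟩
        -- a2 → p.1
        obtain ⟨k2, hk21, hk22, hk23⟩ : ∃ k2, low ≤ k2 ∧ k2 ≤ high ∧ pvGet a2 k1 = pvGet p.1 k2 := by
          by_cases hc : k1 ≤ p.2 - 1
          · obtain ⟨k', h1, h2, h3⟩ := h1src k1 hk11 hc
            exact ⟨k', h1, by omega, h3⟩
          · exact ⟨k1, hk11, hk12, h1unt k1 (by omega) (by omega) (Or.inr (by omega))⟩
        obtain ⟨k3, hk31, hk32, hk33⟩ := hpsrc k2 hk21 hk22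
        exact ⟨k3, hk31, hk32, by rw [hk13, hk23, hk33]⟩
      · intro k1 k2 hk1 hk12 hk2
        by_cases c1 : k2 ≤ p.2 - 1
        · rw [h2unt k1 (by omega) (by omega) (Or.inl (by omega)),
              h2unt k2 (by omega) (by omega) (Or.inl (by omega))]
          exact h1sort k1 k2 hk1 hk12 c1
        · by_cases c2 : p.2 + 1 ≤ k1
          · exact h2sort k1 k2 c2 hk12 hk2
          · have hA : pvGet a3 k1 ≤ pvGet a high := by
              by_cases hc : k1 = p.2
              · rw [hc, hpivA3]
              · exact hleftA3 k1 hk1 (by omega)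
            have hB : pvGet a high ≤ pvGet a3 k2 := by
              by_cases hc : k2 = p.2
              · rw [hc, hpivA3]
              · exact hrightA3 k2 (by omega) hk2
            exact le_trans hA hB
    · rw [quickSortPy, dif_neg hlh]
      exact ⟨rfl, List.Perm.refl a, fun k _ _ _ => rfl, fun k h1 h2 => ⟨k, h1, h2, rfl⟩,
        fun k1 k2 h1 h2 h3 => le_of_eq (congrArg (pvGet a) (by omega : k1 = k2))⟩

theorem quickSort_eq_sorted (A : List Int) :
    quickSortPy A 0 ((A.length : Int) - 1) = PySem.List.sorted A (fun x => x) := by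
  obtain ⟨hlen, hperm, _hunt, _hsrc, hsort⟩ :=
    quickSort_main A.length A 0 ((A.length : Int) - 1) (by omega) (le_refl 0) (by omega)
  set r := quickSortPy A 0 ((A.length : Int) - 1) with hr
  have hpair : r.Pairwise (fun x1 x2 => x1 ≤ x2) := by
    rw [List.pairwise_iff_getElem]
    intro i j hi hj hij
    have hjA : j < A.length := by rw [← hlen]; exact hj
    have h := hsort (i : Int) (j : Int) (by omega) (by exact_mod_cast Nat.le_of_lt hij)
      (by omega)
    rw [pvGet_eq_getElem r (i : Int) (by omega) (by rw [hlen]; exact_mod_cast (by omega : i < A.length)),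
        pvGet_eq_getElem r (j : Int) (by omega) (by rw [hlen]; exact_mod_cast hjA)] at h
    simpa using h
  exact (PySem.List.sorted_id_eq_of_perm_of_pairwise A r hperm hpair).symm

-- ---------- the two-pointer scan of A computes the minimum |pair sum| ----------

theorem pvBestA_le_cur (b : Option Int) (c : Int) : pvBestA b c ≤ c := by
  cases b with
  | none => exact le_refl c
  | some v => simp only [pvBestA]; split <;> omega

theorem pvBestA_le_some (v c : Int) : pvBestA (some v) c ≤ v := by
  simp only [pvBestA]; split <;> omega

theorem pvBestA_cases (b : Option Int) (c : Int) :
    pvBestA b c = c ∨ b = some (pvBestA b c) := by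
  cases b with
  | none => exact Or.inl rfl
  | some v =>
    simp only [pvBestA]
    split
    · exact Or.inl rfl
    · exact Or.inr rfl

theorem pvBestA_nonneg (b : Option Int) (c : Int) (hc : 0 ≤ c)
    (hb : ∀ v, b = some v → 0 ≤ v) : 0 ≤ pvBestA b c := by
  rcases pvBestA_cases b c with h | h
  · omega
  · exact hb _ h

-- sorted, moving the left pointer: the dropped pairs (l, j) cannot beat |a_l + a_r|
theorem drop_left_bound (al aj ar : Int) (h1 : al ≤ aj) (h2 : aj ≤ ar) (h : |ar| < |al|) :
    |al + ar| ≤ |al + aj| := by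
  simp only [Int.abs_eq_natAbs] at *; omega

-- sorted, moving the right pointer: the dropped pairs (i, r) cannot beat |a_l + a_r|
theorem drop_right_bound (al ai ar : Int) (h1 : al ≤ ai) (h2 : ai ≤ ar) (h : |al| ≤ |ar|) :
    |al + ar| ≤ |ai + ar| := by
  simp only [Int.abs_eq_natAbs] at *; omega

theorem scanA_main (a : List Int)
    (hs : ∀ p q : Int, 0 ≤ p → p ≤ q → q < (a.length : Int) → pvGet a p ≤ pvGet a q) :
    ∀ (N : Nat) (l r : Int) (b : Option Int),
      (r - l + 1).toNat ≤ N → 0 ≤ l → r < (a.length : Int) →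
      (b = none → l ≤ r) → (∀ v, b = some v → 0 ≤ v) →
      (0 ≤ scanA a l r b) ∧
      (∀ i j : Int, l ≤ i → i ≤ j → j ≤ r → scanA a l r b ≤ |pvGet a i + pvGet a j|) ∧
      ((∃ i j : Int, l ≤ i ∧ i ≤ j ∧ j ≤ r ∧ scanA a l r b = |pvGet a i + pvGet a j|) ∨
        b = some (scanA a l r b)) ∧
      (∀ v, b = some v → scanA a l r b ≤ v) := by
  intro N
  induction N with
  | zero =>
    intro l r b hN h0 hr hbn hb0
    have hlr : ¬ l ≤ r := by omega
    rw [scanA, if_neg hlr]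
    cases b with
    | none => exact absurd (hbn rfl) hlr
    | some v =>
      exact ⟨hb0 v rfl, fun i j hi hij hj => (hlr (by omega)).elim, Or.inr rfl,
        fun w hw => le_of_eq (Option.some.inj hw)⟩
  | succ N ih =>
    intro l r b hN h0 hr hbn hb0
    by_cases hlr : l ≤ r
    · rw [scanA, if_pos hlr]
      simp only []
      have hcur0 : (0:Int) ≤ |pvGet a l + pvGet a r| := abs_nonneg _
      set cur := |pvGet a l + pvGet a r| with hcurdef
      have hb1c : pvBestA b cur ≤ cur := pvBestA_le_cur b cur
      have hb10 : 0 ≤ pvBestA b cur := pvBestA_nonneg b cur hcur0 hb0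
      by_cases h0b : pvBestA b cur = 0
      · rw [if_pos h0b, h0b]
        refine ⟨le_refl 0, fun i j _ _ _ => abs_nonneg _, ?_, fun v hv => by
          have := hb0 v hv; omega⟩
        rcases pvBestA_cases b cur with hc | hc
        · left
          exact ⟨l, r, le_refl l, hlr, le_refl r, by rw [← hcurdef]; omega⟩
        · right
          rw [h0b] at hc
          exact hc
      · rw [if_neg h0b]
        by_cases hab : |pvGet a l| > |pvGet a r|
        · rw [if_pos hab]
          obtain ⟨I0, I1, I2, I3⟩ := ih (l + 1) r (some (pvBestA b cur)) (by omega)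
            (by omega) hr (fun h => nomatch h)
            (fun v hv => (Option.some.inj hv) ▸ hb10)
          have hmb1 : scanA a (l + 1) r (some (pvBestA b cur)) ≤ pvBestA b cur := I3 _ rfl
          refine ⟨I0, ?_, ?_, fun v hv => le_trans hmb1 (by rw [hv]; exact pvBestA_le_some v cur)⟩
          · intro i j hi hij hj
            by_cases hil : l + 1 ≤ i
            · exact I1 i j hil hij hj
            · have hie : i = l := by omega
              subst hie
              have ha1 : pvGet a i ≤ pvGet a j := hs i j (by omega) hij (by omega)
              have ha2 : pvGet a j ≤ pvGet a r := hs j r (by omega) hj hr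
              calc scanA a (i + 1) r (some (pvBestA b cur)) ≤ pvBestA b cur := hmb1
                _ ≤ cur := hb1c
                _ ≤ |pvGet a i + pvGet a j| := drop_left_bound _ _ _ ha1 ha2 hab
          · rcases I2 with ⟨i, j, h1, h2, h3, h4⟩ | hsome
            · exact Or.inl ⟨i, j, by omega, h2, h3, h4⟩
            · have hmb : pvBestA b cur = scanA a (l + 1) r (some (pvBestA b cur)) :=
                Option.some.inj hsome
              rcases pvBestA_cases b cur with hc | hc
              · exact Or.inl ⟨l, r, le_refl l, hlr, le_refl r, by rw [← hcurdef, ← hmb, hc]⟩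
              · exact Or.inr (hc.trans (congrArg some hmb))
        · rw [if_neg hab]
          have hab' : |pvGet a l| ≤ |pvGet a r| := by omega
          obtain ⟨I0, I1, I2, I3⟩ := ih l (r - 1) (some (pvBestA b cur)) (by omega)
            h0 (by omega) (fun h => nomatch h)
            (fun v hv => (Option.some.inj hv) ▸ hb10)
          have hmb1 : scanA a l (r - 1) (some (pvBestA b cur)) ≤ pvBestA b cur := I3 _ rfl
          refine ⟨I0, ?_, ?_, fun v hv => le_trans hmb1 (by rw [hv]; exact pvBestA_le_some v cur)⟩
          · intro i j hi hij hj
            by_cases hjr : j ≤ r - 1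
            · exact I1 i j hi hij hjr
            · have hje : j = r := by omega
              subst hje
              have ha1 : pvGet a l ≤ pvGet a i := hs l i h0 hi (by omega)
              have ha2 : pvGet a i ≤ pvGet a j := hs i j (by omega) hij hr
              calc scanA a l (j - 1) (some (pvBestA b cur)) ≤ pvBestA b cur := hmb1
                _ ≤ cur := hb1c
                _ ≤ |pvGet a i + pvGet a j| := drop_right_bound _ _ _ ha1 ha2 hab'
          · rcases I2 with ⟨i, j, h1, h2, h3, h4⟩ | hsome
            · exact Or.inl ⟨i, j, h1, h2, by omega, h4⟩
            · have hmb : pvBestA b cur = scanA a l (r - 1) (some (pvBestA b cur)) :=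
                Option.some.inj hsome
              rcases pvBestA_cases b cur with hc | hc
              · exact Or.inl ⟨l, r, le_refl l, hlr, le_refl r, by rw [← hcurdef, ← hmb, hc]⟩
              · exact Or.inr (hc.trans (congrArg some hmb))
    · rw [scanA, if_neg hlr]
      cases b with
      | none => exact absurd (hbn rfl) hlr
      | some v =>
        exact ⟨hb0 v rfl, fun i j hi hij hj => (hlr (by omega)).elim, Or.inr rfl,
          fun w hw => le_of_eq (Option.some.inj hw)⟩

theorem solution_eq_scan (A : List Int) :
    solution A = scanA (PySem.List.sorted A (fun x => x)) 0 ((A.length : Int) - 1) none := by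
  unfold solution
  simp only []
  rw [quickSort_eq_sorted]

-- A's result is the minimum of |x + y| over (value) pairs drawn from A
theorem solution_A_char (A : List Int) (hA : A ≠ []) :
    (∀ x ∈ A, ∀ y ∈ A, solution A ≤ |x + y|) ∧
      (∃ x ∈ A, ∃ y ∈ A, solution A = |x + y|) := by
  set t := PySem.List.sorted A (fun x => x) with ht
  have hlen : t.length = A.length := PySem.List.length_sorted A _ _
  have hn : 0 < A.length := List.length_pos_of_ne_nil hA
  have hsrt : ∀ p q : Int, 0 ≤ p → p ≤ q → q < (t.length : Int) → pvGet t p ≤ pvGet t q := by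
    intro p q hp hpq hq
    rw [pvGet_eq_getElem t p hp (by omega), pvGet_eq_getElem t q (by omega) hq]
    exact PySem.List.sorted_id_getElem_mono A (by omega) (by rw [← ht]; omega)
  obtain ⟨_h0, hlb, hach, _⟩ := scanA_main t hsrt A.length 0 ((A.length : Int) - 1) none
    (by omega) (le_refl 0) (by rw [hlen]; omega) (fun _ => by omega) (fun v hv => nomatch hv)
  rw [← solution_eq_scan] at hlb hach
  constructor
  · intro x hx y hy
    obtain ⟨p, hp, hpe⟩ := List.getElem_of_mem ((PySem.List.mem_sorted A (fun z : Int => z) false x).mpr hx)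
    obtain ⟨q, hq, hqe⟩ := List.getElem_of_mem ((PySem.List.mem_sorted A (fun z : Int => z) false y).mpr hy)
    rcases le_total p q with hle | hle
    · have h := hlb (p : Int) (q : Int) (by omega) (by exact_mod_cast hle)
        (by rw [hlen] at hq; omega)
      rw [pvGet_eq_getElem t _ (by omega) (by exact_mod_cast hp),
          pvGet_eq_getElem t _ (by omega) (by exact_mod_cast hq)] at h
      simp only [Int.toNat_natCast] at h
      rw [hpe, hqe] at h
      exact h
    · have h := hlb (q : Int) (p : Int) (by omega) (by exact_mod_cast hle)
        (by rw [hlen] at hp; omega)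
      rw [pvGet_eq_getElem t _ (by omega) (by exact_mod_cast hq),
          pvGet_eq_getElem t _ (by omega) (by exact_mod_cast hp)] at h
      simp only [Int.toNat_natCast] at h
      rw [hqe, hpe] at h
      rw [add_comm]
      exact h
  · rcases hach with ⟨i, j, h1, h2, h3, h4⟩ | hnone
    · have hib : i < (t.length : Int) := by rw [hlen]; omega
      have hjb : j < (t.length : Int) := by rw [hlen]; omega
      refine ⟨pvGet t i, ?_, pvGet t j, ?_, h4⟩
      · rw [pvGet_eq_getElem t i h1 hib]
        exact (PySem.List.mem_sorted A _ _ _).mp (List.getElem_mem _)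
      · rw [pvGet_eq_getElem t j (by omega) hjb]
        exact (PySem.List.mem_sorted A _ _ _).mp (List.getElem_mem _)
    · exact nomatch hnone

-- ---------- B's abs-sorted adjacent pass computes the same minimum ----------

theorem pvAdjStep_le_left (b : Int) (p : Int × Int) : pvAdjStep b p ≤ b := by
  unfold pvAdjStep; simp only []; split <;> omega

theorem pvAdjStep_le_pair (b : Int) (p : Int × Int) : pvAdjStep b p ≤ |p.1 + p.2| := by
  unfold pvAdjStep; simp only []; split <;> omega

theorem foldl_pvAdjStep_le_init : ∀ (L : List (Int × Int)) (b : Int),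
    L.foldl pvAdjStep b ≤ b := by
  intro L
  induction L with
  | nil => intro b; exact le_refl b
  | cons p L ih =>
    intro b
    exact le_trans (ih (pvAdjStep b p)) (pvAdjStep_le_left b p)

theorem foldl_pvAdjStep_le_mem : ∀ (L : List (Int × Int)) (b : Int) (p : Int × Int),
    p ∈ L → L.foldl pvAdjStep b ≤ |p.1 + p.2| := by
  intro L
  induction L with
  | nil => intro b p hp; exact absurd hp (List.not_mem_nil)
  | cons q L ih =>
    intro b p hp
    rcases List.mem_cons.mp hp with he | hm
    · subst he
      exact le_trans (foldl_pvAdjStep_le_init L (pvAdjStep b p)) (pvAdjStep_le_pair b p)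
    · exact ih (pvAdjStep b q) p hm

theorem foldl_pvAdjStep_cases : ∀ (L : List (Int × Int)) (b : Int),
    L.foldl pvAdjStep b = b ∨ ∃ p ∈ L, L.foldl pvAdjStep b = |p.1 + p.2| := by
  intro L
  induction L with
  | nil => intro b; exact Or.inl rfl
  | cons q L ih =>
    intro b
    rcases ih (pvAdjStep b q) with h | ⟨p, hp, he⟩
    · rw [List.foldl_cons, h]
      unfold pvAdjStep
      simp only []
      split
      · exact Or.inr ⟨q, List.mem_cons_self, rfl⟩
      · exact Or.inl rfl
    · exact Or.inr ⟨p, List.mem_cons_of_mem q hp, by rw [List.foldl_cons, he]⟩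

-- a same-sign pair costs at least twice the smallest absolute value
theorem same_sign_bound (z a b : Int) (h1 : |z| ≤ |a|) (h2 : |z| ≤ |b|)
    (hs : (0 ≤ a ∧ 0 ≤ b) ∨ (a ≤ 0 ∧ b ≤ 0)) : 2 * |z| ≤ |a + b| := by
  simp only [Int.abs_eq_natAbs] at *; omega

-- an opposite-sign pair is bounded below by any inner adjacent opposite-sign pair
theorem opp_sign_bound (xi xj yk yk1 : Int) (h1 : |xi| ≤ |yk|) (h2 : |yk| ≤ |yk1|)
    (h3 : |yk1| ≤ |xj|)
    (ho2 : yk < 0 ∧ 0 < yk1 ∨ yk1 < 0 ∧ 0 < yk) :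
    |yk + yk1| ≤ |xi + xj| := by
  simp only [Int.abs_eq_natAbs] at *; omega

-- discrete intermediate value: between opposite-sign, all-nonzero endpoints lies an
-- adjacent opposite-sign pair
theorem sign_flip (s : List Int) : ∀ (d i j : Nat), j - i ≤ d → i ≤ j →
    (s.getD i 0 < 0 ∧ 0 < s.getD j 0 ∨ s.getD j 0 < 0 ∧ 0 < s.getD i 0) →
    (∀ k, i ≤ k → k ≤ j → s.getD k 0 ≠ 0) →
    ∃ k, i ≤ k ∧ k < j ∧
      (s.getD k 0 < 0 ∧ 0 < s.getD (k + 1) 0 ∨ s.getD (k + 1) 0 < 0 ∧ 0 < s.getD k 0) := by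
  intro d
  induction d with
  | zero =>
    intro i j h hij hopp _
    have : i = j := by omega
    subst this
    omega
  | succ d ih =>
    intro i j h hij hopp hnz
    by_cases hij' : i = j
    · subst hij'; omega
    · have hlt : i < j := by omega
      rcases lt_trichotomy (s.getD (i + 1) 0) 0 with hneg | hzero | hpos
      · rcases hopp with ⟨h1, h2⟩ | ⟨h1, h2⟩
        · obtain ⟨k, hk1, hk2, hk3⟩ := ih (i + 1) j (by omega) (by omega)
            (Or.inl ⟨hneg, h2⟩) (fun k hka hkb => hnz k (by omega) hkb)
          exact ⟨k, by omega, hk2, hk3⟩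
        · exact ⟨i, le_refl i, by omega, Or.inr ⟨hneg, h2⟩⟩
      · exact absurd hzero (hnz (i + 1) (by omega) (by omega))
      · rcases hopp with ⟨h1, h2⟩ | ⟨h1, h2⟩
        · exact ⟨i, le_refl i, by omega, Or.inl ⟨h1, hpos⟩⟩
        · obtain ⟨k, hk1, hk2, hk3⟩ := ih (i + 1) j (by omega) (by omega)
            (Or.inr ⟨h1, hpos⟩) (fun k hka hkb => hnz k (by omega) hkb)
          exact ⟨k, by omega, hk2, hk3⟩

theorem abs_add_self_int (x : Int) : |x + x| = 2 * |x| := by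
  simp only [Int.abs_eq_natAbs]; omega

theorem solution_alt_eq (A : List Int) :
    solution_alt A =
      ((PySem.List.sorted A (fun x => |x|)).zip (PySem.List.sorted A (fun x => |x|)).tail).foldl
        pvAdjStep (2 * |(PySem.List.sorted A (fun x => |x|)).getD 0 0|) := rfl

-- B's result is the same minimum of |x + y| over (value) pairs drawn from A
theorem solution_B_char (A : List Int) (hA : A ≠ []) :
    (∀ x ∈ A, ∀ y ∈ A, solution_alt A ≤ |x + y|) ∧
      (∃ x ∈ A, ∃ y ∈ A, solution_alt A = |x + y|) := by
  set s := PySem.List.sorted A (fun x => |x|) with hsdef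
  have hlen : s.length = A.length := PySem.List.length_sorted A _ _
  have hn : 0 < A.length := List.length_pos_of_ne_nil hA
  have hgd : ∀ (k : Nat) (hk : k < s.length), s.getD k 0 = s[k]'hk :=
    fun k hk => List.getD_eq_getElem s 0 hk
  have habs : ∀ p q : Nat, p ≤ q → q < s.length → |s.getD p 0| ≤ |s.getD q 0| := by
    intro p q hpq hq
    rw [hgd p (by omega), hgd q hq]
    exact PySem.List.key_sorted_getElem_mono A (fun x => |x|) hpq (by rw [← hsdef]; exact hq)
  have hcand : ∀ k : Nat, k + 1 < s.length →
      solution_alt A ≤ |s.getD k 0 + s.getD (k + 1) 0| := by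
    intro k hk
    have hkz : k < (s.zip s.tail).length := by
      simp only [List.length_zip, List.length_tail]
      omega
    have hmem : (s.getD k 0, s.getD (k + 1) 0) ∈ s.zip s.tail := by
      have hz : (s.zip s.tail)[k]'hkz = (s[k]'(by omega), s.tail[k]'(by simp [List.length_tail]; omega)) :=
        List.getElem_zip
      have htl : s.tail[k]'(by simp [List.length_tail]; omega) = s[k + 1]'hk :=
        List.getElem_tail _
      rw [hgd k (by omega), hgd (k + 1) hk, ← htl, ← hz]
      exact List.getElem_mem hkz
    rw [solution_alt_eq, ← hsdef]
    exact foldl_pvAdjStep_le_mem _ _ _ hmem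
  have hinit : solution_alt A ≤ 2 * |s.getD 0 0| := by
    rw [solution_alt_eq, ← hsdef]
    exact foldl_pvAdjStep_le_init _ _
  have hmemA : ∀ k : Nat, k < s.length → s.getD k 0 ∈ A := by
    intro k hk
    rw [hgd k hk]
    exact (PySem.List.mem_sorted A _ _ _).mp (List.getElem_mem hk)
  have hlb2 : ∀ i j : Nat, i ≤ j → j < s.length →
      solution_alt A ≤ |s.getD i 0 + s.getD j 0| := by
    intro i j hij hj
    by_cases hsame : (0 ≤ s.getD i 0 ∧ 0 ≤ s.getD j 0) ∨ (s.getD i 0 ≤ 0 ∧ s.getD j 0 ≤ 0)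
    · exact le_trans hinit (same_sign_bound _ _ _
        (habs 0 i (Nat.zero_le i) (by omega)) (habs 0 j (Nat.zero_le j) hj) hsame)
    · have hopp : s.getD i 0 < 0 ∧ 0 < s.getD j 0 ∨ s.getD j 0 < 0 ∧ 0 < s.getD i 0 := by
        omega
      by_cases hz : ∃ k, i ≤ k ∧ k ≤ j ∧ s.getD k 0 = 0
      · obtain ⟨k, hk1, hk2, hk3⟩ := hz
        have h0k : |s.getD 0 0| ≤ |s.getD k 0| := habs 0 k (Nat.zero_le k) (by omega)
        rw [hk3] at h0k
        have : solution_alt A ≤ 0 := by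
          refine le_trans hinit ?_
          simp only [Int.abs_eq_natAbs] at h0k ⊢
          omega
        exact le_trans this (abs_nonneg _)
      · obtain ⟨k, hk1, hk2, hk3⟩ := sign_flip s (j - i) i j (le_refl _) hij hopp
          (fun k hka hkb hk0 => hz ⟨k, hka, hkb, hk0⟩)
        exact le_trans (hcand k (by omega))
          (opp_sign_bound _ _ _ _ (habs i k hk1 (by omega))
            (habs k (k + 1) (by omega) (by omega)) (habs (k + 1) j (by omega) hj) hk3)
  constructor
  · intro x hx y hy
    obtain ⟨p, hp, hpe⟩ := List.getElem_of_mem ((PySem.List.mem_sorted A (fun z : Int => |z|) false x).mpr hx)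
    obtain ⟨q, hq, hqe⟩ := List.getElem_of_mem ((PySem.List.mem_sorted A (fun z : Int => |z|) false y).mpr hy)
    rcases le_total p q with hle | hle
    · have h := hlb2 p q hle hq
      rw [hgd p (by omega), hgd q hq, hpe, hqe] at h
      exact h
    · have h := hlb2 q p hle hp
      rw [hgd q (by omega), hgd p hp, hqe, hpe] at h
      rw [add_comm]
      exact h
  · have hs0 : 0 < s.length := by omega
    rcases foldl_pvAdjStep_cases (s.zip s.tail) (2 * |s.getD 0 0|) with h | ⟨p, hp, he⟩
    · refine ⟨s.getD 0 0, hmemA 0 hs0, s.getD 0 0, hmemA 0 hs0, ?_⟩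
      rw [solution_alt_eq, ← hsdef, h, abs_add_self_int]
    · obtain ⟨h1, h2⟩ := List.of_mem_zip hp
      refine ⟨p.1, (PySem.List.mem_sorted A _ _ _).mp h1,
        p.2, (PySem.List.mem_sorted A _ _ _).mp (List.mem_of_mem_tail h2), ?_⟩
      rw [solution_alt_eq, ← hsdef, he]

-- ===== VERDICT (by name: the statement is the Claim_ definition above) =====
theorem solution_spec : Claim_equal_solution := by
  intro A _hdom hpre
  unfold Spec_solution
  obtain ⟨hAlb, xa, hxa, ya, hya, hAa⟩ := solution_A_char A hpre
  obtain ⟨hBlb, xb, hxb, yb, hyb, hBa⟩ := solution_B_char A hpre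
  have h1 : solution A ≤ solution_alt A := by
    rw [hBa]; exact hAlb xb hxb yb hyb
  have h2 : solution_alt A ≤ solution A := by
    rw [hAa]; exact hBlb xa hxa ya hya
  omega
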